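-- pv_equiv track=rewrite | github.com/Kimiagholizadeh/Chatbot | paylines.py | generate_paylines
-- ===== SOURCE A (Python) =====
-- from typing import List
--
-- def generate_paylines(payline_count: int, reel_count: int, row_count: int) -> List[List[int]]:
--     """Generate simple deterministic paylines.
--
--     Each payline = list[row_index_per_reel].
--     For a 5x3 game: row indices are 0..2.
--     """
--     if payline_count <= 0:
--         return []
--
--     lines: List[List[int]] = []
--     mid = (row_count // 2) % row_count
--
--     # baseline patterns
--     base_patterns: List[List[int]] = []
--     base_patterns.append([mid] * reel_count)  # straight middle
--     if row_count >= 2: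
--         base_patterns.append([0] * reel_count)  # top
--         base_patterns.append([row_count - 1] * reel_count)  # bottom
--     if row_count >= 3 and reel_count >= 5:
--         base_patterns.append([0, 1, 2, 1, 0][:reel_count])  # V
--         base_patterns.append([2, 1, 0, 1, 2][:reel_count])  # inverted V
--
--     # fill with patterned variations
--     i = 0
--     while len(lines) < payline_count:
--         if i < len(base_patterns):
--             lines.append(base_patterns[i])
--         else:
--             # diagonal / zigzag variants
--             mode = i % 4
--             line: List[int] = []
--             for col in range(reel_count):
--                 if mode == 0:
--                     row = col % row_count
--                 elif mode == 1:
--                     row = (row_count - 1 - col) % row_count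
--                 elif mode == 2:
--                     row = (mid + ((-1) ** col)) % row_count
--                 else:
--                     row = (mid + (1 if col % 3 == 0 else -1)) % row_count
--                 line.append(int(row))
--             lines.append(line)
--         i += 1
--     return lines
-- ===== SOURCE B (Python) =====
-- from typing import List
--
-- def generate_paylines(payline_count: int, reel_count: int, row_count: int) -> List[List[int]]:
--     """Generate simple deterministic paylines (table-driven).
--
--     Builds the four zigzag variant lines once and emits the result as a
--     slice of the base patterns plus a table lookup keyed by i % 4.
--     """
--     if payline_count <= 0:
--         return []
--
--     mid = (row_count // 2) % row_count
--
--     base: List[List[int]] = [[mid] * reel_count]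
--     if row_count >= 2:
--         base.append([0] * reel_count)
--         base.append([row_count - 1] * reel_count)
--     if row_count >= 3 and reel_count >= 5:
--         base.append([0, 1, 2, 1, 0][:reel_count])
--         base.append([2, 1, 0, 1, 2][:reel_count])
--
--     variants: List[List[int]] = [
--         [c % row_count for c in range(reel_count)],
--         [(row_count - 1 - c) % row_count for c in range(reel_count)],
--         [(mid + (-1) ** c) % row_count for c in range(reel_count)],
--         [(mid + (1 if c % 3 == 0 else -1)) % row_count for c in range(reel_count)],
--     ]
--
--     head = base[:payline_count]
--     return head + [variants[i % 4] for i in range(len(head), payline_count)]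
-- ===== Notes on version B (the rewrite author's own statement) =====
-- stated objective: faster
-- what changed: A's while-loop recomputes each zigzag variant line column by column for every payline; B precomputes the four variant lines once as a table, takes the base patterns as a slice, and emits the rest by i % 4 table lookup.
import Mathlib
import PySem

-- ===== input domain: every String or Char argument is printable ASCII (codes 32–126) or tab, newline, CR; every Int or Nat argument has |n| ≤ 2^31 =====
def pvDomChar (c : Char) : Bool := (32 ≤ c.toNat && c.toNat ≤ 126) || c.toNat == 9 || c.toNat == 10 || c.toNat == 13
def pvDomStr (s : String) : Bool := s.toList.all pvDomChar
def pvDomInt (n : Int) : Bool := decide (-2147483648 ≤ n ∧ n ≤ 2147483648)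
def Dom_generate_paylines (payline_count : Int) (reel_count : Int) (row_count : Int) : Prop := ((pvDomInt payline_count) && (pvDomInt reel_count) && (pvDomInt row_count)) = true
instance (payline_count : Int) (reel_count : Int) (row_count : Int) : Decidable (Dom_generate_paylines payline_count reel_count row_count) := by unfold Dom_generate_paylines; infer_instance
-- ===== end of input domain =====

-- B replaces A's per-payline inner column loop by a 4-entry table of variant lines built
-- once, emitting head-slice + table lookups (measured faster in a timing run).

-- ===== PORT A =====
-- A's base_patterns construction (three appends guarded by row_count/reel_count)
def pvBasePatterns (reel_count : Int) (row_count : Int) (mid : Int) : List (List Int) :=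
  let base := [List.replicate reel_count.toNat mid]
  let base := if row_count ≥ 2 then
      base ++ [List.replicate reel_count.toNat 0, List.replicate reel_count.toNat (row_count - 1)]
    else base
  if row_count ≥ 3 ∧ reel_count ≥ 5 then
      base ++ [PySem.List.slice ([0,1,2,1,0] : List Int) none (some reel_count),
               PySem.List.slice ([2,1,0,1,2] : List Int) none (some reel_count)]
    else base

-- A's 'while len(lines) < payline_count' loop, step for step
def pvAWhile (payline_count : Int) (reel_count : Int) (row_count : Int) (mid : Int)
    (base : List (List Int)) (i : Int) (lines : List (List Int)) : List (List Int) :=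
  if _h : lines.length < payline_count.toNat then
    let entry :=
      if i < (base.length : Int) then PySem.List.pyGetD base i []
      else
        let mode := PySem.Int.mod i 4
        (PySem.List.pyRange 0 reel_count 1).foldl (fun line col =>
          let row :=
            if mode = 0 then PySem.Int.mod col row_count
            else if mode = 1 then PySem.Int.mod (row_count - 1 - col) row_count
            else if mode = 2 then PySem.Int.mod (mid + (-1 : Int) ^ col.toNat) row_count
            else PySem.Int.mod (mid + (if PySem.Int.mod col 3 = 0 then (1:Int) else -1)) row_count
          line ++ [row]) []
    pvAWhile payline_count reel_count row_count mid base (i + 1) (lines ++ [entry])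
  else lines
termination_by payline_count.toNat - lines.length
decreasing_by
  simp
  omega
def generate_paylines (payline_count : Int) (reel_count : Int) (row_count : Int) : List (List Int) :=
  if payline_count ≤ 0 then []
  else
    let mid := PySem.Int.mod (PySem.Int.floordiv row_count 2) row_count
    let base := pvBasePatterns reel_count row_count mid
    pvAWhile payline_count reel_count row_count mid base 0 []

-- ===== PORT B =====
def generate_paylines_alt (payline_count : Int) (reel_count : Int) (row_count : Int) : List (List Int) :=
  if payline_count ≤ 0 then []
  else
    let mid := PySem.Int.mod (PySem.Int.floordiv row_count 2) row_count
    let base := pvBasePatterns reel_count row_count mid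
    let variants : List (List Int) := [
      (PySem.List.pyRange 0 reel_count 1).map (fun c => PySem.Int.mod c row_count),
      (PySem.List.pyRange 0 reel_count 1).map (fun c => PySem.Int.mod (row_count - 1 - c) row_count),
      (PySem.List.pyRange 0 reel_count 1).map (fun c => PySem.Int.mod (mid + (-1 : Int) ^ c.toNat) row_count),
      (PySem.List.pyRange 0 reel_count 1).map (fun c =>
        PySem.Int.mod (mid + (if PySem.Int.mod c 3 = 0 then (1:Int) else -1)) row_count)]
    let head := PySem.List.slice base none (some payline_count)
    head ++ (PySem.List.pyRange (head.length : Int) payline_count 1).map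
      (fun i => PySem.List.pyGetD variants (PySem.Int.mod i 4) [])

-- ===== PRECONDITION & SPEC =====
-- Pre_ excludes row_count = 0 with payline_count > 0, where Python A raises ZeroDivisionError
-- computing (row_count // 2) % row_count (B raises there too).
def Pre_generate_paylines (payline_count : Int) (reel_count : Int) (row_count : Int) : Prop :=
  payline_count ≤ 0 ∨ row_count ≠ 0
instance (payline_count : Int) (reel_count : Int) (row_count : Int) : Decidable (Pre_generate_paylines payline_count reel_count row_count) := by unfold Pre_generate_paylines; infer_instance
def pvWitness_generate_paylines : Int × Int × Int := (7, 5, 3)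

def Spec_generate_paylines (payline_count : Int) (reel_count : Int) (row_count : Int) (out : List (List Int)) : Prop := out = generate_paylines_alt payline_count reel_count row_count
instance (payline_count : Int) (reel_count : Int) (row_count : Int) (out : List (List Int)) : Decidable (Spec_generate_paylines payline_count reel_count row_count out) := by unfold Spec_generate_paylines; infer_instance

-- ===== CLAIM (what is proved, stated in full; the proofs are below) =====
def Claim_equal_generate_paylines : Prop := ∀ (payline_count : Int) (reel_count : Int) (row_count : Int), Dom_generate_paylines payline_count reel_count row_count → Pre_generate_paylines payline_count reel_count row_count → Spec_generate_paylines payline_count reel_count row_count (generate_paylines payline_count reel_count row_count)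

-- ===== LEMMAS AND PROOFS =====

-- proof-only names for the variant table and for the line A emits at index i
def pvVariants (reel_count : Int) (row_count : Int) (mid : Int) : List (List Int) := [
  (PySem.List.pyRange 0 reel_count 1).map (fun c => PySem.Int.mod c row_count),
  (PySem.List.pyRange 0 reel_count 1).map (fun c => PySem.Int.mod (row_count - 1 - c) row_count),
  (PySem.List.pyRange 0 reel_count 1).map (fun c => PySem.Int.mod (mid + (-1 : Int) ^ c.toNat) row_count),
  (PySem.List.pyRange 0 reel_count 1).map (fun c =>
    PySem.Int.mod (mid + (if PySem.Int.mod c 3 = 0 then (1:Int) else -1)) row_count)]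

def pvEmit (base : List (List Int)) (reel_count : Int) (row_count : Int) (mid : Int) (i : Int) : List Int :=
  if i < (base.length : Int) then PySem.List.pyGetD base i []
  else PySem.List.pyGetD (pvVariants reel_count row_count mid) (PySem.Int.mod i 4) []

-- A's inner column loop at index i produces exactly the table entry for i % 4
lemma pvLine_eq_variant (reel_count row_count mid i : Int) :
    ((PySem.List.pyRange 0 reel_count 1).foldl (fun line col =>
      let row :=
        if PySem.Int.mod i 4 = 0 then PySem.Int.mod col row_count
        else if PySem.Int.mod i 4 = 1 then PySem.Int.mod (row_count - 1 - col) row_count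
        else if PySem.Int.mod i 4 = 2 then PySem.Int.mod (mid + (-1 : Int) ^ col.toNat) row_count
        else PySem.Int.mod (mid + (if PySem.Int.mod col 3 = 0 then (1:Int) else -1)) row_count
      line ++ [row]) [])
    = PySem.List.pyGetD (pvVariants reel_count row_count mid) (PySem.Int.mod i 4) [] := by
  rw [PySem.List.foldl_append_singleton_eq_map]
  have h0 : 0 ≤ PySem.Int.mod i 4 := PySem.Int.mod_nonneg i (by norm_num)
  have h4 : PySem.Int.mod i 4 < 4 := PySem.Int.mod_lt i (by norm_num)
  interval_cases h : PySem.Int.mod i 4 <;>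
    simp [pvVariants, PySem.List.pyGetD]

-- the while loop emits pvEmit for every remaining index
lemma pvAWhile_eq (p r rc mid : Int) (base : List (List Int)) :
    ∀ (n : Nat) (lines : List (List Int)) (i : Int),
      p.toNat - lines.length = n → i = (lines.length : Int) →
      pvAWhile p r rc mid base i lines
        = lines ++ (PySem.List.pyRange i p 1).map (pvEmit base r rc mid) := by
  intro n
  induction n with
  | zero =>
    intro lines i hn hi
    rw [pvAWhile]
    have hnp : ¬ lines.length < p.toNat := by omega
    rw [dif_neg hnp]
    have hpi : p ≤ i := by omega
    rw [PySem.List.pyRange_one_eq_nil hpi]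
    simp
  | succ m ih =>
    intro lines i hn hi
    rw [pvAWhile]
    have hlt : lines.length < p.toNat := by omega
    rw [dif_pos hlt]
    have hip : i < p := by omega
    have hentry :
        (if i < (base.length : Int) then PySem.List.pyGetD base i []
         else
          let mode := PySem.Int.mod i 4
          (PySem.List.pyRange 0 r 1).foldl (fun line col =>
            let row :=
              if mode = 0 then PySem.Int.mod col rc
              else if mode = 1 then PySem.Int.mod (rc - 1 - col) rc
              else if mode = 2 then PySem.Int.mod (mid + (-1 : Int) ^ col.toNat) rc
              else PySem.Int.mod (mid + (if PySem.Int.mod col 3 = 0 then (1:Int) else -1)) rc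
            line ++ [row]) []) = pvEmit base r rc mid i := by
      by_cases hib : i < (base.length : Int)
      · simp [pvEmit, hib]
      · simp only [if_neg hib, pvEmit]
        rw [pvLine_eq_variant r rc mid i]
    rw [hentry]
    rw [ih (lines ++ [pvEmit base r rc mid i]) (i + 1) (by simp; omega) (by simp; omega)]
    rw [PySem.List.pyRange_one_cons hip]
    simp

lemma pvTake_eq_map_range {α : Type} (xs : List α) (d : α) (n : Nat) (h : n ≤ xs.length) :
    (List.range n).map (fun k => xs.getD k d) = xs.take n := by
  apply List.ext_getElem
  · simp; omega
  · intro j h1 h2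
    simp at h1 ⊢
    rw [List.getElem?_eq_getElem (by omega)]
    simp

-- ===== VERDICT (by name: the statement is the Claim_ definition above) =====
theorem generate_paylines_spec : Claim_equal_generate_paylines := by
  intro p r rc _hdom _hpre
  unfold Spec_generate_paylines generate_paylines generate_paylines_alt
  by_cases hp : p ≤ 0
  · simp [hp]
  · simp only [if_neg hp]
    set mid := PySem.Int.mod (PySem.Int.floordiv rc 2) rc with hmid
    set base := pvBasePatterns r rc mid with hbase
    have hppos : 0 < p := by omega
    rw [pvAWhile_eq p r rc mid base (p.toNat) [] 0 (by simp) (by simp)]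
    rw [PySem.List.slice_to base (le_of_lt hppos)]
    show (PySem.List.pyRange 0 p 1).map (pvEmit base r rc mid)
      = base.take p.toNat ++ (PySem.List.pyRange ((base.take p.toNat).length : Int) p 1).map
          (fun i => PySem.List.pyGetD (pvVariants r rc mid) (PySem.Int.mod i 4) [])
    by_cases hbp : (base.length : Int) ≤ p
    · -- all base patterns fit
      have htake : base.take p.toNat = base := List.take_of_length_le (by omega)
      rw [htake]
      rw [PySem.List.pyRange_one_append 0 (base.length : Int) p (by positivity) hbp]
      rw [List.map_append]
      congr 1
      · rw [List.map_congr_left (g := fun i => PySem.List.pyGetD base i []) ?_]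
        · have := PySem.List.map_pyGetD_pyRange_zero (xs := base) (d := ([] : List Int))
          exact this
        · intro i hi
          rw [PySem.List.mem_pyRange_one] at hi
          simp [pvEmit, hi.2]
      · apply List.map_congr_left
        intro i hi
        rw [PySem.List.mem_pyRange_one] at hi
        simp [pvEmit, not_lt.mpr hi.1]
    · -- fewer paylines than base patterns
      have hpb : p < (base.length : Int) := by omega
      have hlen : (base.take p.toNat).length = p.toNat := by simp; omega
      rw [hlen]
      have hpp : ((p.toNat : Int)) = p := by omega
      rw [hpp, PySem.List.pyRange_one_eq_nil (le_refl p)]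
      simp only [List.map_nil, List.append_nil]
      rw [PySem.List.pyRange_one 0 p]
      simp only [List.map_map]
      rw [List.map_congr_left (g := fun k : Nat => base.getD k []) ?_]
      · simp only [Int.sub_zero]
        exact pvTake_eq_map_range base [] p.toNat (by omega)
      · intro k hk
        simp at hk
        have hk' : (k : Int) < (base.length : Int) := by omega
        simp [Function.comp, pvEmit, hk', PySem.List.pyGetD_natCast]
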